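-- pv_equiv track=rewrite | github.com/dice-group/hashing-the-hypertrie-eval | scripts/0_preprocess/prepare_parsed_results_data.py | transform_id
-- ===== SOURCE A (Python) =====
-- from typing import List, Optional
--
-- def transform_id(id: int, dataset: str, triplestore: str) -> Optional[int]:
--     if ((triplestore == "fuseki" and dataset == 'wikidata-2020-11-11') or
--             (triplestore == "fuseki-ltj")):
--         return id
--     else:
--         excluded_queries = {
--             "swdf": [],
--             "dbpedia2015": [24, 33, 86, 91, 99, 103, 295],
--             "watdiv10000": [],
--             'wikidata-2020-11-11': [109, 235, 365, 451, 466],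
--         }
--         assert dataset in excluded_queries
--         excludes = excluded_queries[dataset]
--         offset = 0
--         for exclude in excludes:
--             if id < exclude:
--                 break
--             elif id == exclude:
--                 return None
--             else:
--                 offset += 1
--         return id - offset
-- ===== SOURCE B (Python) =====
-- from typing import List, Optional
--
-- EXCLUDED_QUERIES = {
--     "swdf": [],
--     "dbpedia2015": [24, 33, 86, 91, 99, 103, 295],
--     "watdiv10000": [],
--     'wikidata-2020-11-11': [109, 235, 365, 451, 466],
-- }
--
-- def transform_id(id: int, dataset: str, triplestore: str) -> Optional[int]:
--     if ((triplestore == "fuseki" and dataset == 'wikidata-2020-11-11') or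
--             (triplestore == "fuseki-ltj")):
--         return id
--     assert dataset in EXCLUDED_QUERIES
--     excludes = EXCLUDED_QUERIES[dataset]
--     # binary search (bisect_left): lo = number of excluded ids < id
--     lo, hi = 0, len(excludes)
--     while lo < hi:
--         mid = (lo + hi) // 2
--         if excludes[mid] < id:
--             lo = mid + 1
--         else:
--             hi = mid
--     if lo < len(excludes) and excludes[lo] == id:
--         return None
--     return id - lo
-- ===== Notes on version B (the rewrite author's own statement) =====
-- stated objective: idiomatic
-- what changed: The linear accumulate-offset-with-break scan over the excluded-query list is replaced by a binary search (bisect_left): lo directly counts the excluded ids below id, then one indexed comparison decides the None case.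
import Mathlib
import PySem

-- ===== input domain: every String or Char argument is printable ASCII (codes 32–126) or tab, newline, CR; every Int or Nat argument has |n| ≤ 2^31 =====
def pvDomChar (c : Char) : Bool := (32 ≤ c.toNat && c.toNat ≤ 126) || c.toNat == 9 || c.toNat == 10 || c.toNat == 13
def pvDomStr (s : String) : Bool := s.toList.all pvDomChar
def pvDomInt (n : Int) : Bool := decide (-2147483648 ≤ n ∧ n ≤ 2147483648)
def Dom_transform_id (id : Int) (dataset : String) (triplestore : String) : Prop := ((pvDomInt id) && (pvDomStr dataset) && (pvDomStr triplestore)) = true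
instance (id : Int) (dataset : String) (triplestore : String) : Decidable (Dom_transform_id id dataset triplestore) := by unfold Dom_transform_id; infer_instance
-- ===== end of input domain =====

-- B replaces A's linear accumulate-offset scan of the excluded-query list by a hand-written
-- binary search (bisect_left): lo counts the excluded ids below id; equal wherever A returns
-- (Pre_ excludes datasets outside the dict without the fast path, where A raises AssertionError).


-- ===== PORT A =====
-- the excluded_queries dict literal (shared module constant of A and B)
def pvExcluded : PySem.Dict String (List Int) :=
  (((PySem.Dict.empty.insert "swdf" []).insert "dbpedia2015" [24, 33, 86, 91, 99, 103, 295]).insert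
      "watdiv10000" []).insert "wikidata-2020-11-11" [109, 235, 365, 451, 466]

-- A's for-loop: offset accumulator, break on id < exclude, early return None on id == exclude
def pvLoopA (id : Int) : List Int → Int → Option Int
  | [], offset => some (id - offset)
  | exclude :: rest, offset =>
    if id < exclude then some (id - offset)
    else if id = exclude then none
    else pvLoopA id rest (offset + 1)

def transform_id (id : Int) (dataset : String) (triplestore : String) : Option Int :=
  if (triplestore == "fuseki" && dataset == "wikidata-2020-11-11") || triplestore == "fuseki-ltj" then
    some id
  else
    match pvExcluded.get? dataset with
    | none => none  -- here Python's assert raises AssertionError; excluded by Pre_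
    | some excludes => pvLoopA id excludes 0

-- ===== PORT B =====
-- B's hand-written bisect_left while-loop (lo, hi shrink until lo = hi)
def pvBisectB (excludes : List Int) (id : Int) (lo hi : Nat) : Nat :=
  if lo < hi then
    let mid := (lo + hi) / 2
    if excludes.getD mid 0 < id then pvBisectB excludes id (mid + 1) hi
    else pvBisectB excludes id lo mid
  else lo
termination_by hi - lo
decreasing_by all_goals omega

def transform_id_alt (id : Int) (dataset : String) (triplestore : String) : Option Int :=
  if (triplestore == "fuseki" && dataset == "wikidata-2020-11-11") || triplestore == "fuseki-ltj" then
    some id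
  else
    match pvExcluded.get? dataset with
    | none => none  -- here Python's assert raises AssertionError; excluded by Pre_
    | some excludes =>
      let lo := pvBisectB excludes id 0 excludes.length
      if lo < excludes.length ∧ excludes.getD lo 0 = id then none
      else some (id - (lo : Int))

-- ===== PRECONDITION & SPEC =====
-- Pre_ excludes exactly the inputs on which A's assert fails (dataset not a key of the
-- excluded_queries dict and the fast-path guard false): there A raises AssertionError.
def Pre_transform_id (id : Int) (dataset : String) (triplestore : String) : Prop :=
  ((triplestore == "fuseki" && dataset == "wikidata-2020-11-11") || triplestore == "fuseki-ltj") = true ∨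
  dataset = "swdf" ∨ dataset = "dbpedia2015" ∨ dataset = "watdiv10000" ∨ dataset = "wikidata-2020-11-11"
instance (id : Int) (dataset : String) (triplestore : String) : Decidable (Pre_transform_id id dataset triplestore) := by
  unfold Pre_transform_id; infer_instance

def pvWitness_transform_id : Int × String × String := (100, "dbpedia2015", "tentris")

def Spec_transform_id (id : Int) (dataset : String) (triplestore : String) (out : Option Int) : Prop := out = transform_id_alt id dataset triplestore
instance (id : Int) (dataset : String) (triplestore : String) (out : Option Int) : Decidable (Spec_transform_id id dataset triplestore out) := by unfold Spec_transform_id; infer_instance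

-- ===== CLAIM (what is proved, stated in full; the proofs are below) =====
def Claim_equal_transform_id : Prop := ∀ (id : Int) (dataset : String) (triplestore : String), Dom_transform_id id dataset triplestore → Pre_transform_id id dataset triplestore → Spec_transform_id id dataset triplestore (transform_id id dataset triplestore)

-- ===== LEMMAS AND PROOFS =====
-- prefix property of countP on a strictly sorted list
lemma pv_count_iff (id : Int) (xs : List Int) (hs : xs.Pairwise (· < ·)) :
    ∀ k (hk : k < xs.length), (xs[k] < id ↔ k < xs.countP (fun e => decide (e < id))) := by
  induction xs with
  | nil => intro k hk; simp at hk
  | cons x rest ih =>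
    rcases List.pairwise_cons.mp hs with ⟨hx, hrest⟩
    intro k hk
    cases k with
    | zero =>
      simp only [List.getElem_cons_zero, List.countP_cons]
      constructor
      · intro h; split_ifs with hp
        · omega
        · simp [h] at hp
      · intro h
        by_cases hxid : x < id
        · exact hxid
        · exfalso
          have h0 : rest.countP (fun e => decide (e < id)) = 0 := by
            rw [List.countP_eq_zero]
            intro a ha
            have := hx a ha
            simpa using (show ¬ a < id by omega)
          simp [hxid, h0] at h
    | succ k =>
      simp only [List.getElem_cons_succ, List.countP_cons]
      have hk' : k < rest.length := by simpa using hk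
      rw [ih hrest k hk']
      by_cases hxid : x < id
      · simp [hxid]
      · have h0 : rest.countP (fun e => decide (e < id)) = 0 := by
          rw [List.countP_eq_zero]
          intro a ha
          have := hx a ha
          simpa using (show ¬ a < id by omega)
        simp [hxid, h0]

lemma pv_bisect_eq (id : Int) (xs : List Int) (hs : xs.Pairwise (· < ·)) :
    ∀ n lo hi, hi - lo ≤ n → lo ≤ xs.countP (fun e => decide (e < id)) →
      xs.countP (fun e => decide (e < id)) ≤ hi → hi ≤ xs.length →
      pvBisectB xs id lo hi = xs.countP (fun e => decide (e < id)) := by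
  intro n
  induction n with
  | zero => intro lo hi h1 h2 h3 h4; rw [pvBisectB]; rw [if_neg (by omega)]; omega
  | succ n ih =>
    intro lo hi h1 h2 h3 h4
    rw [pvBisectB]
    by_cases hlh : lo < hi
    · rw [if_pos hlh]
      have hmid : (lo + hi) / 2 < xs.length := by omega
      have hget : xs.getD ((lo + hi) / 2) 0 = xs[(lo + hi) / 2] := List.getD_eq_getElem xs 0 hmid
      by_cases hc : xs.getD ((lo + hi) / 2) 0 < id
      · rw [if_pos hc]
        have := (pv_count_iff id xs hs _ hmid).mp (hget ▸ hc)
        exact ih _ _ (by omega) (by omega) h3 h4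
      · rw [if_neg hc]
        have := (pv_count_iff id xs hs _ hmid).not.mp (hget ▸ hc)
        exact ih _ _ (by omega) h2 (by omega) (by omega)
    · rw [if_neg hlh]; omega

lemma pv_loop_eq (id : Int) (xs : List Int) (hs : xs.Pairwise (· < ·)) :
    ∀ offset : Int, pvLoopA id xs offset =
      if id ∈ xs then none
      else some (id - offset - (xs.countP (fun e => decide (e < id)) : Int)) := by
  induction xs with
  | nil => intro offset; simp [pvLoopA]
  | cons x rest ih =>
    rcases List.pairwise_cons.mp hs with ⟨hx, hrest⟩
    intro offset
    rw [pvLoopA]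
    by_cases h1 : id < x
    · rw [if_pos h1]
      have hnm : id ∉ x :: rest := by
        intro hm
        rcases List.mem_cons.mp hm with h | h
        · omega
        · have := hx id h; omega
      have h0 : (x :: rest).countP (fun e => decide (e < id)) = 0 := by
        rw [List.countP_eq_zero]
        intro a ha
        rcases List.mem_cons.mp ha with h | h
        · simp; omega
        · have := hx a h; simp; omega
      simp [hnm, h0]
    · rw [if_neg h1]
      by_cases h2 : id = x
      · simp [h2]
      · rw [if_neg h2]
        rw [ih hrest (offset + 1)]
        have hxlt : x < id := by omega
        have hmem : (id ∈ x :: rest) = (id ∈ rest) := by simp [List.mem_cons, h2]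
        rw [List.countP_cons]
        simp only [hxlt, decide_true, if_pos, hmem]
        split_ifs with h
        · rfl
        · congr 1; push_cast; ring

lemma pv_post_iff (id : Int) (xs : List Int) (hs : xs.Pairwise (· < ·)) :
    (xs.countP (fun e => decide (e < id)) < xs.length ∧
      xs.getD (xs.countP (fun e => decide (e < id))) 0 = id) ↔ id ∈ xs := by
  set c := xs.countP (fun e => decide (e < id)) with hc
  constructor
  · rintro ⟨h1, h2⟩
    rw [List.getD_eq_getElem xs 0 h1] at h2
    exact h2 ▸ List.getElem_mem h1
  · intro hm
    rcases List.getElem_of_mem hm with ⟨k, hk, hke⟩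
    have hnk : ¬ xs[k] < id := by omega
    have hck : c ≤ k := by
      have := (pv_count_iff id xs hs k hk).not.mp hnk
      omega
    have hcl : c < xs.length := by omega
    have hgec : ¬ xs[c] < id := by
      have := (pv_count_iff id xs hs c hcl).not.mpr (by omega)
      exact this
    by_cases hck2 : c = k
    · subst hck2
      exact ⟨hcl, by rw [List.getD_eq_getElem xs 0 hcl]; omega⟩
    · exfalso
      have hlt : xs[c] < xs[k] := (List.pairwise_iff_getElem.mp hs) c k hcl hk (by omega)
      omega

lemma pv_agree (id : Int) (xs : List Int) (hs : xs.Pairwise (· < ·)) :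
    pvLoopA id xs 0 =
      (let lo := pvBisectB xs id 0 xs.length
       if lo < xs.length ∧ xs.getD lo 0 = id then none
       else some (id - (lo : Int))) := by
  have hb : pvBisectB xs id 0 xs.length = xs.countP (fun e => decide (e < id)) :=
    pv_bisect_eq id xs hs xs.length 0 xs.length (by omega) (by omega)
      (List.countP_le_length) (le_refl _)
  rw [pv_loop_eq id xs hs 0]
  simp only [hb]
  simp only [pv_post_iff id xs hs]
  split_ifs with h1
  · rfl
  · congr 1; ring

-- ===== VERDICT (by name: the statement is the Claim_ definition above) =====
theorem transform_id_spec : Claim_equal_transform_id := by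
  intro id dataset ts _ hpre
  unfold Spec_transform_id transform_id transform_id_alt
  by_cases hg : ((ts == "fuseki" && dataset == "wikidata-2020-11-11") || ts == "fuseki-ltj") = true
  · rw [if_pos hg, if_pos hg]
  · rw [if_neg hg, if_neg hg]
    have hd : dataset = "swdf" ∨ dataset = "dbpedia2015" ∨ dataset = "watdiv10000" ∨
        dataset = "wikidata-2020-11-11" := by
      rcases hpre with h | h; · exact absurd h hg
      exact h
    rcases hd with h | h | h | h <;> subst h <;>
      simpa [pvExcluded, PySem.Dict.get?, PySem.Dict.insert, PySem.Dict.empty] using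
        pv_agree id _ (by decide)
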